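-- pv_equiv track=rewrite | github.com/lukuiR/Rpublic | python codi/CyclicRotation.py | solution
-- ===== SOURCE A (Python) =====
-- def solution(A, K):
--     l=len(A)
--     B=[0]*l
--     for i in range(l):
--         t=i+K
--         t=t%l
--         B[t]=A[i]
--     return B
-- ===== SOURCE B (Python) =====
-- def solution(A, K):
--     l = len(A)
--     if l == 0:
--         return []
--     K %= l
--     return A[-K:] + A[:-K]
-- ===== Notes on version B (the rewrite author's own statement) =====
-- stated objective: idiomatic
-- what changed: Replaces the per-element scatter loop into a preallocated list with two bulk slices concatenated (A[-K%l:] + A[:-K%l]) after reducing K modulo the length.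
import Mathlib
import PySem

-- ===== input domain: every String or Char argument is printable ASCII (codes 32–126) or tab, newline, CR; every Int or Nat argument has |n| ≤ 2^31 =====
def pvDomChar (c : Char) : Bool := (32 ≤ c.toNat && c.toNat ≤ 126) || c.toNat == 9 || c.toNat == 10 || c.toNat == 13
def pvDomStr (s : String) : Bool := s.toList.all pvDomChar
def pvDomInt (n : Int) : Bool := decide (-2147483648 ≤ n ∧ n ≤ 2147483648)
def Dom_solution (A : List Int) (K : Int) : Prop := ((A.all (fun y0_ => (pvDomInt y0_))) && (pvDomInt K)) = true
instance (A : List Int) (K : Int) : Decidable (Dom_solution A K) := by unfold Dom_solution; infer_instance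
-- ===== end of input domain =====

-- B replaces A's per-element scatter loop into a preallocated list with the idiomatic
-- slice-concatenation rotation A[-K%l:] + A[:-K%l]; same O(n) cost, different decomposition.

-- ===== PORT A =====
-- Literal port of A's scatter loop: B=[0]*l; for i in range(l): t=i+K; t=t%l; B[t]=A[i].
-- The indices i and t are always in range during the loop, so pyGetD/pySetD are exact here.
def solution (A : List Int) (K : Int) : List Int :=
  let l : Int := (A.length : Int)
  (PySem.List.pyRange 0 l 1).foldl
    (fun B i =>
      let t := i + K
      let t := PySem.Int.mod t l
      PySem.List.pySetD B t (PySem.List.pyGetD A i 0))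
    (List.replicate A.length 0)

-- ===== PORT B =====
-- Literal port of Source B: l=len(A); if l==0: return []; K %= l; return A[-K:] + A[:-K].
def solution_alt (A : List Int) (K : Int) : List Int :=
  if A = [] then []
  else
    let k := PySem.Int.mod K (A.length : Int)
    PySem.List.slice A (some (-k)) none ++ PySem.List.slice A none (some (-k))

-- ===== PRECONDITION & SPEC =====
def Spec_solution (A : List Int) (K : Int) (out : List Int) : Prop := out = solution_alt A K
instance (A : List Int) (K : Int) (out : List Int) : Decidable (Spec_solution A K out) := by unfold Spec_solution; infer_instance

-- ===== CLAIM (what is proved, stated in full; the proofs are below) =====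
def Claim_equal_solution : Prop := ∀ (A : List Int) (K : Int), Dom_solution A K → Spec_solution A K (solution A K)

-- ===== LEMMAS AND PROOFS =====

-- Writing the consecutive values xs into B starting at position off overwrites exactly that segment.
theorem scatter_seq (xs : List Int) : ∀ (B : List Int) (off : Nat), off + xs.length ≤ B.length →
    (List.range xs.length).foldl (fun B m => B.set (off + m) (xs.getD m 0)) B
      = B.take off ++ xs ++ B.drop (off + xs.length) := by
  induction xs with
  | nil =>
    intro B off h
    simp
  | cons x xs ih =>
    intro B off h
    have hoff : off < B.length := by simp [List.length_cons] at h; omega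
    rw [List.length_cons, List.range_succ_eq_map, List.foldl_cons, List.foldl_map]
    have hfun : (fun (B : List Int) (m : Nat) => B.set (off + m.succ) ((x :: xs).getD m.succ 0))
        = (fun (B : List Int) (m : Nat) => B.set ((off + 1) + m) (xs.getD m 0)) := by
      funext B m
      have he : off + m.succ = (off + 1) + m := by omega
      simp [he]
    rw [hfun]
    simp only [Nat.add_zero, List.getD_cons_zero]
    rw [ih (B.set off x) (off + 1) (by simp [List.length_cons] at h ⊢; omega)]
    have htake : (B.set off x).take (off + 1) = B.take off ++ [x] := by
      rw [List.take_add_one, List.take_set_of_le (le_refl off)]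
      rw [List.getElem?_set_self (by simpa using hoff)]
      rfl
    have hdrop : (B.set off x).drop (off + 1 + xs.length)
        = B.drop (off + (xs.length + 1)) := by
      rw [List.drop_set_of_lt (by omega)]
      congr 1
      omega
    rw [htake, hdrop]
    simp

-- Peel the Int wrappers off port A's loop: it is the Nat-indexed scatter fold.
theorem portA_as_nat_fold (A : List Int) (K : Int) (hA : A ≠ []) :
    solution A K = (List.range A.length).foldl
      (fun B m => B.set ((m + (PySem.Int.mod K (A.length : Int)).toNat) % A.length) (A.getD m 0))
      (List.replicate A.length 0) := by
  have hl : 0 < (A.length : Int) := by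
    exact_mod_cast List.length_pos_iff.mpr hA
  have hk0 : 0 ≤ PySem.Int.mod K (A.length : Int) := PySem.Int.mod_nonneg K hl
  simp only [solution]
  rw [PySem.List.pyRange_one, List.foldl_map]
  simp only [Int.sub_zero, Int.toNat_natCast]
  apply PySem.List.foldl_congr_mem
  intro B m hm
  have hmlt : m < A.length := List.mem_range.mp hm
  have hmod : PySem.Int.mod (0 + (m : Int) + K) (A.length : Int)
      = (((m + (PySem.Int.mod K (A.length : Int)).toNat) % A.length : Nat) : Int) := by
    rw [PySem.Int.mod_eq_emod_of_pos hl]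
    have hK : K % (A.length : Int) = ((PySem.Int.mod K (A.length : Int)).toNat : Int) := by
      rw [Int.toNat_of_nonneg hk0, ← PySem.Int.mod_eq_emod_of_pos hl]
    calc (0 + (m : Int) + K) % (A.length : Int)
        = ((m : Int) % (A.length : Int) + K % (A.length : Int)) % (A.length : Int) := by
          rw [Int.zero_add, Int.add_emod]
      _ = (((m + (PySem.Int.mod K (A.length : Int)).toNat) % A.length : Nat) : Int) := by
          rw [hK]
          push_cast
          rw [Int.emod_add_emod]
  rw [hmod, PySem.List.pySetD_natCast]
  congr 1
  rw [zero_add, PySem.List.pyGetD_natCast]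

-- ===== VERDICT (by name: the statement is the Claim_ definition above) =====
theorem solution_spec : Claim_equal_solution := by
  intro A K _
  unfold Spec_solution solution_alt
  by_cases hA : A = []
  · subst hA
    simp [solution]
  · rw [if_neg hA]
    have hlpos : 0 < A.length := List.length_pos_iff.mpr hA
    have hl : 0 < (A.length : Int) := by exact_mod_cast hlpos
    set k : Nat := (PySem.Int.mod K (A.length : Int)).toNat with hkdef
    have hkA : PySem.Int.mod K (A.length : Int) = (k : Int) :=
      (Int.toNat_of_nonneg (PySem.Int.mod_nonneg K hl)).symm
    have hklt : k < A.length := by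
      have := PySem.Int.mod_lt K hl
      omega
    have hBside : PySem.List.slice A (some (-(PySem.Int.mod K (A.length : Int)))) none
        ++ PySem.List.slice A none (some (-(PySem.Int.mod K (A.length : Int))))
        = A.drop (A.length - k) ++ A.take (A.length - k) := by
      rw [hkA]
      rcases Nat.eq_zero_or_pos k with hk0 | hkpos
      · rw [hk0]
        simp [PySem.List.slice_zero_start, PySem.List.slice_none_none,
          PySem.List.slice_to A (le_refl (0 : Int)), List.take_of_length_le,
          List.drop_of_length_le]
      · rw [PySem.List.slice_from_neg_natCast A k hkpos, PySem.List.slice_to_neg_natCast A k hkpos]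
    rw [hBside, portA_as_nat_fold A K hA, ← hkdef]
    rw [show List.range A.length
        = List.range (A.length - k) ++ (List.range k).map (fun x => (A.length - k) + x) from by
      rw [← List.range_add, Nat.sub_add_cancel (le_of_lt hklt)]]
    rw [List.foldl_append, List.foldl_map]
    have hphase1 : (List.range (A.length - k)).foldl
        (fun B m => B.set ((m + k) % A.length) (A.getD m 0))
        (List.replicate A.length 0)
        = List.replicate k 0 ++ A.take (A.length - k) := by
      have hcongr : ∀ (B : List Int), ∀ m ∈ List.range (A.length - k),
          B.set ((m + k) % A.length) (A.getD m 0)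
            = B.set (k + m) ((A.take (A.length - k)).getD m 0) := by
        intro B m hm
        have hmlt : m < A.length - k := List.mem_range.mp hm
        have hm2 : m < A.length := by omega
        rw [Nat.mod_eq_of_lt (by omega), Nat.add_comm m k]
        congr 1
        simp [List.getD, hmlt, List.getElem?_eq_getElem hm2]
      rw [PySem.List.foldl_congr_mem _ _ _ _ hcongr]
      have hph1 := scatter_seq (A.take (A.length - k)) (List.replicate A.length 0) k
        (by simp [List.length_take]; omega)
      rw [List.length_take, Nat.min_eq_left (by omega)] at hph1
      rw [hph1, List.take_replicate, List.drop_replicate,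
        Nat.min_eq_left (le_of_lt hklt),
        show A.length - (k + (A.length - k)) = 0 from by omega]
      simp
    rw [hphase1]
    have hcongr2 : ∀ (B : List Int) (m : Nat), m ∈ List.range k →
        B.set (((A.length - k) + m + k) % A.length) (A.getD ((A.length - k) + m) 0)
          = B.set (0 + m) ((A.drop (A.length - k)).getD m 0) := by
      intro B m hm
      have hmlt : m < k := List.mem_range.mp hm
      have hidx : ((A.length - k) + m + k) % A.length = 0 + m := by
        have he : (A.length - k) + m + k = A.length + m := by omega
        rw [he, Nat.add_comm, Nat.add_mod_right, Nat.mod_eq_of_lt (by omega)]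
        omega
      rw [hidx]
      congr 1
      simp [List.getD, List.getElem?_drop]
    rw [PySem.List.foldl_congr_mem _ _ _ _ hcongr2]
    have hph2 := scatter_seq (A.drop (A.length - k))
      (List.replicate k 0 ++ A.take (A.length - k)) 0
      (by simp [List.length_drop, List.length_take]; omega)
    rw [List.length_drop, show A.length - (A.length - k) = k from by omega] at hph2
    rw [hph2]
    simp only [List.take_zero, List.nil_append, Nat.zero_add]
    have hdropB : (List.replicate k (0 : Int) ++ A.take (A.length - k)).drop k
        = A.take (A.length - k) := by
      simp
    rw [hdropB]
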